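-- pv_equiv track=rewrite | github.com/reski-rukmantiyo/retro-photo-backend | photo_restore/utils/cpu_optimizer.py | _calculate_tiles
-- ===== SOURCE A (Python) =====
-- def _calculate_tiles(height: int, width: int,
--                     tile_size: int, overlap: int) -> list:
--     """Calculate tile coordinates."""
--     tiles = []
--     step = tile_size - overlap
--
--     for y in range(0, height, step):
--         for x in range(0, width, step):
--             y1 = y
--             x1 = x
--             y2 = min(y + tile_size, height)
--             x2 = min(x + tile_size, width)
--
--             # Skip very small tiles
--             if (y2 - y1) > overlap and (x2 - x1) > overlap:
--                 tiles.append((y1, y2, x1, x2))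
--
--     return tiles
-- ===== SOURCE B (Python) =====
-- def _calculate_tiles(height: int, width: int,
--                     tile_size: int, overlap: int) -> list:
--     """Calculate tile coordinates (closed-form grid: count valid rows/cols by ceiling division)."""
--     step = tile_size - overlap
--     if step < 0:
--         # every candidate tile is thinner than the overlap
--         return []
--     nrows = max(0, -(-(height - max(overlap, 0)) // step))
--     ncols = max(0, -(-(width - max(overlap, 0)) // step))
--     return [(i * step, min(i * step + tile_size, height),
--              j * step, min(j * step + tile_size, width))
--             for i in range(nrows) for j in range(ncols)]
-- ===== Notes on version B (the rewrite author's own statement) =====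
-- stated objective: alternative
-- what changed: B replaces A's stride-scan with a per-tile size test by a closed-form count: it computes the number of valid rows and columns directly with ceiling division (and returns [] outright for a negative step), then generates exactly those tiles by index arithmetic, so no candidate is ever generated and filtered out.
import Mathlib
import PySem

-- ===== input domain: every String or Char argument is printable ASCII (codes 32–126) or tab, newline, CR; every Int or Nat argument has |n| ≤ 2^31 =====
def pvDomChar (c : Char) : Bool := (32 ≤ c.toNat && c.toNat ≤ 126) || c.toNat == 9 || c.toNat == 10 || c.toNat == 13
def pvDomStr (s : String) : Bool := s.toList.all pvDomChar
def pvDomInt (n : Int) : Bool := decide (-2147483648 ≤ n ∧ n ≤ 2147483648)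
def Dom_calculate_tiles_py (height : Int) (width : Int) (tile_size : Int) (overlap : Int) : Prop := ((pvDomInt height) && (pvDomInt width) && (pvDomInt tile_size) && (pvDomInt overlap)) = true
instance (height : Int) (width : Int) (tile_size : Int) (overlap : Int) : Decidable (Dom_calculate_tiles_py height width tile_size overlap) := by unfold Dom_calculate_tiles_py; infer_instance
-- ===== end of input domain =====

-- B computes the number of valid rows/columns in closed form by ceiling division and generates
-- the grid directly, instead of A's stride-scan with a per-tile size test; same return value on Pre_.


-- ===== PORT A =====
def calculate_tiles_py (height : Int) (width : Int) (tile_size : Int) (overlap : Int) : List (Int × Int × Int × Int) :=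
  let step := tile_size - overlap
  (PySem.List.pyRange 0 height step).foldl (fun tiles y =>
    (PySem.List.pyRange 0 width step).foldl (fun tiles x =>
      let y1 := y
      let x1 := x
      let y2 := min (y + tile_size) height
      let x2 := min (x + tile_size) width
      if y2 - y1 > overlap ∧ x2 - x1 > overlap then tiles ++ [(y1, y2, x1, x2)] else tiles) tiles) []

-- ===== PORT B =====
def calculate_tiles_py_alt (height : Int) (width : Int) (tile_size : Int) (overlap : Int) : List (Int × Int × Int × Int) :=
  let step := tile_size - overlap
  if step < 0 then []
  else
    let nrows := max 0 (-(PySem.Int.floordiv (-(height - max overlap 0)) step))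
    let ncols := max 0 (-(PySem.Int.floordiv (-(width - max overlap 0)) step))
    (PySem.List.pyRange 0 nrows 1).flatMap (fun i =>
      (PySem.List.pyRange 0 ncols 1).map (fun j =>
        (i * step, min (i * step + tile_size) height,
         j * step, min (j * step + tile_size) width)))

-- ===== PRECONDITION & SPEC =====
-- Pre_ excludes step = 0 (tile_size = overlap), where Python's range(0, n, 0) raises ValueError in A
-- (and B's ceiling division raises ZeroDivisionError).
def Pre_calculate_tiles_py (height : Int) (width : Int) (tile_size : Int) (overlap : Int) : Prop :=
  tile_size ≠ overlap
instance (height : Int) (width : Int) (tile_size : Int) (overlap : Int) : Decidable (Pre_calculate_tiles_py height width tile_size overlap) := by unfold Pre_calculate_tiles_py; infer_instance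
def pvWitness_calculate_tiles_py : Int × Int × Int × Int := (10, 10, 6, 2)

def Spec_calculate_tiles_py (height : Int) (width : Int) (tile_size : Int) (overlap : Int) (out : List (Int × Int × Int × Int)) : Prop := out = calculate_tiles_py_alt height width tile_size overlap
instance (height : Int) (width : Int) (tile_size : Int) (overlap : Int) (out : List (Int × Int × Int × Int)) : Decidable (Spec_calculate_tiles_py height width tile_size overlap out) := by unfold Spec_calculate_tiles_py; infer_instance

-- ===== CLAIM (what is proved, stated in full; the proofs are below) =====
def Claim_equal_calculate_tiles_py : Prop := ∀ (height : Int) (width : Int) (tile_size : Int) (overlap : Int), Dom_calculate_tiles_py height width tile_size overlap → Pre_calculate_tiles_py height width tile_size overlap → Spec_calculate_tiles_py height width tile_size overlap (calculate_tiles_py height width tile_size overlap)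

-- ===== LEMMAS AND PROOFS =====

-- filterMap with an if-some/none body is filter-then-map
theorem pv_filterMap_if {α β : Type} (p : α → Prop) [DecidablePred p] (f : α → β) (l : List α) :
    l.filterMap (fun x => if p x then some (f x) else none)
      = (l.filter (fun x => decide (p x))).map f := by
  induction l with
  | nil => rfl
  | cons a l ih => by_cases h : p a <;> simp [h, ih]

-- inner loop of A, for a fixed row: the row condition b factors out
theorem pv_inner (xs : List Int) (b : Prop) [Decidable b] (px : Int → Prop) [DecidablePred px]
    (f : Int → (Int × Int × Int × Int)) (acc : List (Int × Int × Int × Int)) :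
    xs.foldl (fun a x => if b ∧ px x then a ++ [f x] else a) acc
      = acc ++ if b then (xs.filter (fun x => decide (px x))).map f else [] := by
  by_cases hb : b
  · simpa [hb] using PySem.List.foldl_append_ite px f xs acc
  · simp [hb]

theorem pv_main (py px : Int → Prop) [DecidablePred py] [DecidablePred px]
    (gy gx : Int → Int × Int) (xs : List Int) :
    ∀ (ys : List Int) (acc : List (Int × Int × Int × Int)),
    ys.foldl (fun tiles y => xs.foldl (fun tiles x =>
        if py y ∧ px x then tiles ++ [((gy y).1, (gy y).2, (gx x).1, (gx x).2)] else tiles) tiles) acc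
    = acc ++ (ys.filterMap (fun y => if py y then some (gy y) else none)).flatMap
        (fun r => (xs.filterMap (fun x => if px x then some (gx x) else none)).map (fun c => (r.1, r.2, c.1, c.2)))
  | [], acc => by simp
  | y :: ys, acc => by
    rw [List.foldl_cons, pv_inner xs (py y) px _ acc, pv_main py px gy gx xs ys]
    by_cases hy : py y
    · simp [hy, pv_filterMap_if px gx xs, List.map_map, Function.comp_def]
    · simp [hy]

-- a positive-step pyRange from 0 is strictly increasing
theorem pv_pyRange_pairwise (n s : Int) (hs : 0 < s) :
    (PySem.List.pyRange 0 n s).Pairwise (· < ·) := by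
  rw [PySem.List.pyRange_of_pos 0 n hs]
  exact List.pairwise_lt_range.map _ (fun a b h => by
    have : (a : Int) < (b : Int) := by exact_mod_cast h
    nlinarith)

-- one axis: the stride values passing the size test are exactly the first N multiples of step,
-- N computed by ceiling division
theorem pv_axis (n t o : Int) (hs : 0 < t - o) :
    ((PySem.List.pyRange 0 n (t - o)).filter
        (fun y => decide (min (y + t) n - y > o)))
      = (PySem.List.pyRange 0 (max 0 (-(PySem.Int.floordiv (-(n - max o 0)) (t - o)))) 1).map
          (fun i => i * (t - o)) := by
  set s := t - o with hsdef
  set N := -(PySem.Int.floordiv (-(n - max o 0)) s) with hN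
  have hbr : (N - 1) * s < n - max o 0 ∧ n - max o 0 ≤ N * s :=
    (PySem.Int.neg_floordiv_neg_eq_iff_of_pos hs).mp hN.symm
  have h01 : (0 : Int) < 1 := by omega
  -- both sides strictly increasing, hence nodup
  have hpL : ((PySem.List.pyRange 0 n s).filter
      (fun y => decide (min (y + t) n - y > o))).Pairwise (· < ·) :=
    (pv_pyRange_pairwise n s hs).filter _
  have hpR : ((PySem.List.pyRange 0 (max 0 N) 1).map (fun i => i * s)).Pairwise (· < ·) :=
    (pv_pyRange_pairwise (max 0 N) 1 h01).map _ (fun a b h => by nlinarith)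
  have hmem : ∀ x : Int,
      x ∈ (PySem.List.pyRange 0 n s).filter (fun y => decide (min (y + t) n - y > o)) ↔
      x ∈ (PySem.List.pyRange 0 (max 0 N) 1).map (fun i => i * s) := by
    intro x
    simp only [List.mem_filter, List.mem_map,
      PySem.List.mem_pyRange_iff_of_pos hs, PySem.List.mem_pyRange_iff_of_pos h01,
      decide_eq_true_eq]
    have hcond : ∀ y : Int, y < n → (min (y + t) n - y > o ↔ y < n - max o 0) := by
      intro y hyn
      rcases le_total (y + t) n with hc | hc
      · rw [min_eq_left hc]; omega
      · rw [min_eq_right hc]; omega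
    constructor
    · rintro ⟨⟨hx0, hxn, ⟨i, hi⟩⟩, hc⟩
      have hi' : x = i * s := by rw [mul_comm]; omega
      have hxm : x < n - max o 0 := (hcond x hxn).mp hc
      have hi0 : 0 ≤ i := by nlinarith [hi', hx0, hs]
      have hiN : i < N := by
        by_contra hge
        push_neg at hge
        have : N * s ≤ i * s := mul_le_mul_of_nonneg_right hge (le_of_lt hs)
        omega
      exact ⟨i, ⟨hi0, by omega, one_dvd _⟩, hi'.symm⟩
    · rintro ⟨i, ⟨hi0, hiN, -⟩, hx⟩
      have hiN' : i < N := by omega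
      have h1 : i * s ≤ (N - 1) * s := mul_le_mul_of_nonneg_right (by omega) (le_of_lt hs)
      have hxm : x < n - max o 0 := by omega
      have hx0 : 0 ≤ x := by
        have := mul_nonneg hi0 (le_of_lt hs)
        omega
      have hxn : x < n := by omega
      exact ⟨⟨hx0, hxn, ⟨i, by rw [← hx]; ring⟩⟩, (hcond x hxn).mpr hxm⟩
  exact PySem.List.eq_of_perm_of_pairwise_le_of_injective (fun x => x) (fun a b h => h)
    ((List.perm_ext_iff_of_nodup
        (hpL.imp ne_of_lt) (hpR.imp ne_of_lt)).mpr hmem)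
    (hpL.imp le_of_lt) (hpR.imp le_of_lt)

-- the size test factors: the y-conjunct is y < n - max o 0 given the range bound; restated as
-- the filterMap row list used by pv_main
theorem pv_axis' (n t o : Int) (hs : 0 < t - o) :
    ((PySem.List.pyRange 0 n (t - o)).filterMap
        (fun y => if min (y + t) n - y > o then some (y, min (y + t) n) else none))
      = (PySem.List.pyRange 0 (max 0 (-(PySem.Int.floordiv (-(n - max o 0)) (t - o)))) 1).map
          (fun i => (i * (t - o), min (i * (t - o) + t) n)) := by
  rw [pv_filterMap_if (fun y => min (y + t) n - y > o) (fun y => (y, min (y + t) n)),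
    pv_axis n t o hs, List.map_map]
  rfl

-- negative step: every candidate tile has thickness ≤ tile_size < overlap, so A appends nothing
theorem pv_neg (height width tile_size overlap : Int) (hneg : tile_size - overlap < 0) :
    calculate_tiles_py height width tile_size overlap = [] := by
  unfold calculate_tiles_py
  rw [PySem.List.foldl_congr_mem _ _ (fun acc _ => acc) _ (fun acc y _ => by
    rw [PySem.List.foldl_congr_mem _ _ (fun acc _ => acc) _ (fun acc x _ => by
      rw [if_neg]; omega)]
    exact PySem.List.foldl_ignore _ _)]
  exact PySem.List.foldl_ignore _ _

theorem calculate_tiles_py_eq (height width tile_size overlap : Int)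
    (hne : tile_size ≠ overlap) :
    calculate_tiles_py height width tile_size overlap
      = calculate_tiles_py_alt height width tile_size overlap := by
  rcases lt_trichotomy (tile_size - overlap) 0 with hlt | heq | hgt
  · rw [pv_neg height width tile_size overlap hlt]
    unfold calculate_tiles_py_alt
    rw [if_pos hlt]
  · omega
  · unfold calculate_tiles_py calculate_tiles_py_alt
    rw [if_neg (by omega)]
    have := pv_main
      (fun y => min (y + tile_size) height - y > overlap)
      (fun x => min (x + tile_size) width - x > overlap)
      (fun y => (y, min (y + tile_size) height))
      (fun x => (x, min (x + tile_size) width))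
      (PySem.List.pyRange 0 width (tile_size - overlap))
      (PySem.List.pyRange 0 height (tile_size - overlap)) []
    simp only [List.nil_append] at this
    rw [this, pv_axis' height tile_size overlap hgt, pv_axis' width tile_size overlap hgt,
      List.flatMap_map]
    refine List.flatMap_congr (fun i _ => ?_)
    rw [List.map_map]
    rfl

-- ===== VERDICT (by name: the statement is the Claim_ definition above) =====
theorem calculate_tiles_py_spec : Claim_equal_calculate_tiles_py := by
  intro h w t o _ hpre
  unfold Spec_calculate_tiles_py
  exact calculate_tiles_py_eq h w t o hpre
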